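-- pv_equiv track=rewrite | github.com/BobbyRobillard/CodingChallenges | CodeForces/DoremysIQ.py | solution
-- ===== SOURCE A (Python) =====
-- def solution(contests, iq, difficulties):
--     result = ""
--     difficulties.sort()
--     for i in range(contests):
--         if iq <= 0:
--             result += "0"
--         elif difficulties[i] > iq:
--             iq -= 1
--             result += "1"
--         else:
--             result += "1"
--     return result
-- ===== SOURCE B (Python) =====
-- def solution(contests, iq, difficulties):
--     # Note: like A, sorts `difficulties` in place; equivalence is about the return value.
--     difficulties.sort()
--     j = 0
--     while j < contests and iq > 0:
--         if difficulties[j] > iq: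
--             iq -= 1
--         j += 1
--     return "1" * j + "0" * (contests - j)
-- ===== Notes on version B (the rewrite author's own statement) =====
-- stated objective: simpler
-- what changed: Instead of appending one character per iteration of a full range(contests) loop with three branches, B only loops while iq > 0 to count how many '1's are produced (the output is always a run of 1s followed by 0s, since iq never increases), then builds the answer in one step as '1'*j + '0'*(contests-j).
import Mathlib
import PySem

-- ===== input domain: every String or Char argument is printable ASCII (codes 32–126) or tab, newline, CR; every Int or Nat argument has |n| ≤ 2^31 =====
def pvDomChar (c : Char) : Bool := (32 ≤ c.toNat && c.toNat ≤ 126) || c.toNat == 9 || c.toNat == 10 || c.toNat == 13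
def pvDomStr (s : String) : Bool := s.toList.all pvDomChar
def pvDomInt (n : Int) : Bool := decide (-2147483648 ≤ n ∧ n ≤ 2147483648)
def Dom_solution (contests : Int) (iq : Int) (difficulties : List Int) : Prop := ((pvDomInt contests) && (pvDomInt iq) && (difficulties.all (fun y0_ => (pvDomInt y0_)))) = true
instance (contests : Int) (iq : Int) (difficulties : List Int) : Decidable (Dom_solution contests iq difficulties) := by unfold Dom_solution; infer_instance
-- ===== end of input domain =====

-- B replaces A's char-by-char three-branch loop over range(contests) by counting (only while iq > 0)
-- how many '1's are emitted and building '1'*j + '0'*(contests-j) in one step (objective: simpler).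
-- Both A and B sort `difficulties` in place; the equivalence proved here is about the return value.

-- ===== PORT A =====
-- state: (result as List Char, iq); none = IndexError has occurred (excluded by Pre_solution)
def solutionStep (ds : List Int) (st : Option (List Char × Int)) (i : Int) : Option (List Char × Int) :=
  match st with
  | none => none
  | some (result, iq) =>
    if iq ≤ 0 then some (result ++ ['0'], iq)
    else
      match PySem.List.pyGet? ds i with
      | none => none
      | some d => if d > iq then some (result ++ ['1'], iq - 1) else some (result ++ ['1'], iq)

def solution (contests : Int) (iq : Int) (difficulties : List Int) : String :=
  let ds := PySem.List.sorted difficulties (fun x => x) false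
  match (PySem.List.pyRange 0 contests 1).foldl (solutionStep ds) (some ([], iq)) with
  | none => ""   -- unreachable under Pre_solution (Python raises IndexError)
  | some (result, _) => String.mk result

-- ===== PORT B =====
-- the while loop of Source B; `(pyGet? ds j).getD iq` leaves iq unchanged on the out-of-range case
-- (where Python raises IndexError; excluded by Pre_solution)
def altLoop (ds : List Int) (contests : Int) (j : Int) (iq : Int) : Int :=
  if j < contests ∧ 0 < iq then
    altLoop ds contests (j + 1) (if iq < (PySem.List.pyGet? ds j).getD iq then iq - 1 else iq)
  else j
termination_by (contests - j).toNat
decreasing_by omega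

def solution_alt (contests : Int) (iq : Int) (difficulties : List Int) : String :=
  let ds := PySem.List.sorted difficulties (fun x => x) false
  let j := altLoop ds contests 0 iq
  String.mk (List.replicate j.toNat '1' ++ List.replicate (contests - j).toNat '0')

-- ===== PRECONDITION & SPEC =====
-- Pre_solution holds exactly where A returns: A (and B) index the sorted list while iq > 0, so they
-- raise IndexError iff the indexing overruns the list, i.e. unless contests ≤ len(difficulties),
-- iq ≤ 0, or iq depletes before the overrun (iq decrements once per visited element > iq, so the
-- '1'-run is at most iq plus the number of elements ≤ iq).
def Pre_solution (contests : Int) (iq : Int) (difficulties : List Int) : Prop :=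
  iq ≤ 0 ∨ contests ≤ (difficulties.length : Int) ∨
    ((difficulties.countP (fun x => decide (x ≤ iq)) : Int) + iq ≤ (difficulties.length : Int))
instance (contests : Int) (iq : Int) (difficulties : List Int) : Decidable (Pre_solution contests iq difficulties) := by unfold Pre_solution; infer_instance
def pvWitness_solution : Int × Int × List Int := (3, 2, [1, 4, 5])
def Spec_solution (contests : Int) (iq : Int) (difficulties : List Int) (out : String) : Prop := out = solution_alt contests iq difficulties
instance (contests : Int) (iq : Int) (difficulties : List Int) (out : String) : Decidable (Spec_solution contests iq difficulties out) := by unfold Spec_solution; infer_instance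

-- ===== CLAIM (what is proved, stated in full; the proofs are below) =====
def Claim_equal_solution : Prop := ∀ (contests : Int) (iq : Int) (difficulties : List Int), Dom_solution contests iq difficulties → Pre_solution contests iq difficulties → Spec_solution contests iq difficulties (solution contests iq difficulties)

-- ===== LEMMAS AND PROOFS =====

theorem altLoop_ge (ds : List Int) (contests : Int) :
    ∀ (n : ℕ) (j iq : Int), (contests - j).toNat = n → j ≤ altLoop ds contests j iq := by
  intro n
  induction n with
  | zero =>
    intro j iq hn
    rw [altLoop]
    split
    · omega
    · exact le_refl j
  | succ n ih =>
    intro j iq hn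
    rw [altLoop]
    split
    · rename_i h
      have := ih (j + 1) (if iq < (PySem.List.pyGet? ds j).getD iq then iq - 1 else iq) (by omega)
      omega
    · exact le_refl j

-- The main loop correspondence: A's fold from index j equals the run of '1's counted by B's loop
-- followed by '0's, provided (invariant) either contests ≤ len ds or j + iq + #remaining-elements-≤-iq ≤ len ds.
theorem main_loop (ds : List Int) (contests : Int) :
    ∀ (n : ℕ) (j iq : Int) (result : List Char),
      (contests - j).toNat = n → 0 ≤ j →
      (0 < iq → contests ≤ (ds.length : Int) ∨
        j + iq + (((ds.drop j.toNat).countP (fun x => decide (x ≤ iq)) : Int)) ≤ (ds.length : Int)) →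
      ∃ iqf, (PySem.List.pyRange j contests 1).foldl (solutionStep ds) (some (result, iq))
        = some (result ++ List.replicate (altLoop ds contests j iq - j).toNat '1'
                       ++ List.replicate (contests - altLoop ds contests j iq).toNat '0', iqf) := by
  intro n
  induction n with
  | zero =>
    intro j iq result hn hj hinv
    have hle : contests ≤ j := by omega
    rw [PySem.List.pyRange_one_eq_nil hle, altLoop]
    have : ¬ (j < contests ∧ 0 < iq) := by omega
    simp [this]
    omega
  | succ n ih =>
    intro j iq result hn hj hinv
    have hjc : j < contests := by omega
    rw [PySem.List.pyRange_one_cons hjc, List.foldl_cons]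
    by_cases hiq : iq ≤ 0
    · -- A appends '0'; B's loop has already stopped (altLoop j iq = j)
      have hstep : solutionStep ds (some (result, iq)) j = some (result ++ ['0'], iq) := by
        simp [solutionStep, hiq]
      rw [hstep]
      obtain ⟨iqf, hrec⟩ := ih (j + 1) iq (result ++ ['0']) (by omega) (by omega) (by omega)
      refine ⟨iqf, ?_⟩
      rw [hrec]
      have h1 : altLoop ds contests j iq = j := by rw [altLoop]; simp; omega
      have h2 : altLoop ds contests (j + 1) iq = j + 1 := by rw [altLoop]; simp; omega
      rw [h1, h2]
      have e1 : (j - j).toNat = 0 := by omega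
      have e2 : (j + 1 - (j + 1)).toNat = 0 := by omega
      have e3 : (contests - j).toNat = (contests - (j + 1)).toNat + 1 := by omega
      rw [e1, e2, e3]
      simp [List.replicate_succ]
    · -- iq > 0: the invariant puts index j in range; A appends '1', B's loop takes a step
      have hiq' : 0 < iq := by omega
      have hjlen : j < (ds.length : Int) := by
        rcases hinv hiq' with h | h
        · omega
        · have : (0:Int) ≤ ((ds.drop j.toNat).countP (fun x => decide (x ≤ iq)) : Int) := by positivity
          omega
      have hget : PySem.List.pyGet? ds j = some ds[j.toNat] := by
        apply PySem.List.pyGet?_eq_some_getElem <;> omega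
      have hdrop : ds.drop j.toNat = ds[j.toNat] :: ds.drop (j.toNat + 1) :=
        List.drop_eq_getElem_cons (by omega)
      set d := ds[j.toNat] with hd
      -- the new iq after this step, in both ports
      set iq' : Int := if iq < d then iq - 1 else iq with hiq'def
      have hstep : solutionStep ds (some (result, iq)) j = some (result ++ ['1'], iq') := by
        by_cases hcmp : iq < d <;> simp [solutionStep, hiq, hget, hcmp, hiq'def]
      have haltstep : altLoop ds contests j iq = altLoop ds contests (j + 1) iq' := by
        rw [altLoop]
        have : j < contests ∧ 0 < iq := ⟨hjc, hiq'⟩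
        simp [this, hget, hiq'def]
      -- invariant preservation
      have hinv' : 0 < iq' → contests ≤ (ds.length : Int) ∨
          (j + 1) + iq' + (((ds.drop (j + 1).toNat).countP (fun x => decide (x ≤ iq')) : Int)) ≤ (ds.length : Int) := by
        intro hpos
        rcases hinv hiq' with h | h
        · exact Or.inl h
        · right
          have hc : (ds.drop j.toNat).countP (fun x => decide (x ≤ iq))
              = (if d ≤ iq then 1 else 0) + (ds.drop (j.toNat + 1)).countP (fun x => decide (x ≤ iq)) := by
            rw [hdrop, List.countP_cons]
            by_cases hcmp : d ≤ iq <;> simp [hcmp] <;> omega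
          have hmono : (ds.drop (j.toNat + 1)).countP (fun x => decide (x ≤ iq'))
              ≤ (ds.drop (j.toNat + 1)).countP (fun x => decide (x ≤ iq)) := by
            apply List.countP_mono_left
            intro a _ ha
            simp at ha ⊢
            by_cases hcmp : iq < d <;> simp [hcmp, hiq'def] at ha ⊢ <;> omega
          have hj1 : (j + 1).toNat = j.toNat + 1 := by omega
          rw [hj1]
          by_cases hcmp : iq < d
          · have : iq' = iq - 1 := by simp [hiq'def, hcmp]
            have hd0 : ¬ d ≤ iq := by omega
            simp [hd0] at hc
            omega
          · have : iq' = iq := by simp [hiq'def, hcmp]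
            have hd0 : d ≤ iq := by omega
            simp [hd0] at hc
            omega
      rw [hstep]
      obtain ⟨iqf, hrec⟩ := ih (j + 1) iq' (result ++ ['1']) (by omega) (by omega) hinv'
      refine ⟨iqf, ?_⟩
      rw [hrec, haltstep]
      have hge : j + 1 ≤ altLoop ds contests (j + 1) iq' :=
        altLoop_ge ds contests (contests - (j + 1)).toNat (j + 1) iq' rfl
      have e1 : (altLoop ds contests (j + 1) iq' - j).toNat
          = (altLoop ds contests (j + 1) iq' - (j + 1)).toNat + 1 := by omega
      rw [e1]
      simp [List.replicate_succ]

-- ===== VERDICT (by name: the statement is the Claim_ definition above) =====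
theorem solution_spec : Claim_equal_solution := by
  intro contests iq difficulties _ hpre
  unfold Spec_solution solution solution_alt
  set ds := PySem.List.sorted difficulties (fun x => x) false with hds
  have hperm : ds.Perm difficulties := PySem.List.sorted_perm difficulties (fun x => x) false
  have hlen : ds.length = difficulties.length := hperm.length_eq
  have hcount : ds.countP (fun x => decide (x ≤ iq)) = difficulties.countP (fun x => decide (x ≤ iq)) :=
    hperm.countP_eq _
  have hinv : 0 < iq → contests ≤ (ds.length : Int) ∨
      (0:Int) + iq + (((ds.drop (0:Int).toNat).countP (fun x => decide (x ≤ iq)) : Int)) ≤ (ds.length : Int) := by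
    intro hpos
    rcases hpre with h | h | h
    · omega
    · left; omega
    · right; simp only [Int.toNat_zero, List.drop_zero]; omega
  obtain ⟨iqf, hfold⟩ := main_loop ds contests (contests - 0).toNat 0 iq [] rfl (by omega) hinv
  simp only [hfold]
  have hge : (0:Int) ≤ altLoop ds contests 0 iq :=
    altLoop_ge ds contests (contests - 0).toNat 0 iq rfl
  simp
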